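-- pv_equiv track=rewrite | github.com/CodingGroszber/wall_calculator | src/tegla_szamolo/visualiser.py | render_segment_braille
-- ===== SOURCE A (Python) =====
-- _BRAILLE_BASE = 0x2800
--
-- _CELL_W = 2
--
-- _CELL_H = 4
--
-- _DOT_BIT = [
--     [0x01, 0x08],
--     [0x02, 0x10],
--     [0x04, 0x20],
--     [0x40, 0x80],
-- ]
--
-- def _make_canvas(px_w: int, px_h: int):
--     cols = max(1, (px_w + _CELL_W - 1) // _CELL_W)
--     rows = max(1, (px_h + _CELL_H - 1) // _CELL_H)
--     return [[0] * cols for _ in range(rows)], rows, cols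
--
-- def _set_pixel(canvas, px_x: int, px_y: int):
--     cell_col = px_x // _CELL_W
--     cell_row = px_y // _CELL_H
--     dot_col = px_x % _CELL_W
--     dot_row = px_y % _CELL_H
--     try:
--         canvas[cell_row][cell_col] |= _DOT_BIT[dot_row][dot_col]
--     except IndexError:
--         pass
--
-- def _canvas_to_chars(canvas) -> list[str]:
--     return [
--         "".join(chr(_BRAILLE_BASE + cell) for cell in row)
--         for row in canvas
--     ]
--
-- def render_segment_braille(width_cm: int, height_cm: int,
--                            label: str = "") -> list[str]:
--     """
--     Render a rectangle outline of (width_cm × height_cm) pixels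
--     using braille characters. Returns a list of strings (one per
--     braille row). Label is centred inside the rectangle.
--     """
--     px_w = max(4, width_cm)
--     px_h = max(8, height_cm)
--
--     canvas, rows, cols = _make_canvas(px_w, px_h)
--
--     # Draw outline — top & bottom
--     for px_x in range(px_w):
--         _set_pixel(canvas, px_x, 0)
--         _set_pixel(canvas, px_x, px_h - 1)
--     # Left & right
--     for px_y in range(px_h):
--         _set_pixel(canvas, 0,        px_y)
--         _set_pixel(canvas, px_w - 1, px_y)
--
--     lines = _canvas_to_chars(canvas)
--
--     # Embed label at vertical centre
--     lbl = label[:2]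
--     if lbl and rows >= 2:
--         mid_row = rows // 2
--         mid_col = max(0, (cols - len(lbl)) // 2)
--         row_list = list(lines[mid_row])
--         for ci, ch in enumerate(lbl):
--             if mid_col + ci < len(row_list):
--                 row_list[mid_col + ci] = ch
--         lines[mid_row] = "".join(row_list)
--
--     return lines
-- ===== SOURCE B (Python) =====
-- # B: per-cell rendering — compute each braille cell's bit pattern directly from
-- # the border geometry instead of scattering pixels along the perimeter.
--
-- _BRAILLE_BASE = 0x2800
--
-- _DOT_BIT = [
--     [0x01, 0x08],
--     [0x02, 0x10],
--     [0x04, 0x20],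
--     [0x40, 0x80],
-- ]
--
--
-- def _cell_value(px_w: int, px_h: int, row: int, col: int) -> int:
--     cell = 0
--     for dr in range(4):
--         for dc in range(2):
--             x = col * 2 + dc
--             y = row * 4 + dr
--             if x < px_w and y < px_h and (x == 0 or x == px_w - 1
--                                           or y == 0 or y == px_h - 1):
--                 cell |= _DOT_BIT[dr][dc]
--     return cell
--
--
-- def render_segment_braille(width_cm: int, height_cm: int,
--                            label: str = "") -> list[str]:
--     px_w = max(4, width_cm)
--     px_h = max(8, height_cm)
--     cols = (px_w + 1) // 2
--     rows = (px_h + 3) // 4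
--     lines = [
--         "".join(chr(_BRAILLE_BASE + _cell_value(px_w, px_h, row, col))
--                 for col in range(cols))
--         for row in range(rows)
--     ]
--
--     lbl = label[:2]
--     if lbl:
--         mid_row = rows // 2
--         mid_col = max(0, (cols - len(lbl)) // 2)
--         row_list = list(lines[mid_row])
--         for ci, ch in enumerate(lbl):
--             if mid_col + ci < len(row_list):
--                 row_list[mid_col + ci] = ch
--         lines[mid_row] = "".join(row_list)
--
--     return lines
-- ===== Notes on version B (the rewrite author's own statement) =====
-- stated objective: alternative
-- what changed: Replaces the mutable-canvas perimeter scatter (allocate a rows x cols grid, then walk the four edges setting one pixel at a time with try/except index guards) by a direct per-cell computation: each braille cell's bit pattern is computed in one closed pass from the border geometry (px_x==0 or px_x==px_w-1 or px_y==0 or px_y==px_h-1), so the canvas, _set_pixel and the edge loops disappear.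
import Mathlib
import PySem

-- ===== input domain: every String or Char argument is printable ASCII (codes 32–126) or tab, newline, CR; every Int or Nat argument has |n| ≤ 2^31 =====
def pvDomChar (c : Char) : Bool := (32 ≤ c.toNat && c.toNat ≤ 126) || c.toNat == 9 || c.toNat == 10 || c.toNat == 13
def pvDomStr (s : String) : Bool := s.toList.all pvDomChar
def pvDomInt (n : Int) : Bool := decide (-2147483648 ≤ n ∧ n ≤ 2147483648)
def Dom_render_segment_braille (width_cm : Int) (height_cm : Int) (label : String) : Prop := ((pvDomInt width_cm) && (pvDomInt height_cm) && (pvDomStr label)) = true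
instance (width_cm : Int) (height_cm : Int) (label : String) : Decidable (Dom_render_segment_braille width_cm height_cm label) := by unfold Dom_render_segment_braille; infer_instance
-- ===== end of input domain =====

-- B replaces A's mutable-canvas perimeter scatter by a direct per-cell computation of each
-- braille cell's bit pattern from the border geometry (same return value; neither mutates input).

-- chr(code): exact for the code points used here (0x2800..0x28FF and printable ASCII)
def pvChr (code : Int) : Char := Char.ofNat code.toNat

-- ===== PORT A =====
def pvDotBit : List (List Int) := [[1, 8], [2, 16], [4, 32], [64, 128]]

def pvMakeCanvas (px_w : Int) (px_h : Int) : List (List Int) × Int × Int :=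
  let cols := max 1 (PySem.Int.floordiv (px_w + 2 - 1) 2)
  let rows := max 1 (PySem.Int.floordiv (px_h + 4 - 1) 4)
  (((PySem.List.pyRange 0 rows 1).map (fun _ => PySem.List.pyRepeat [(0 : Int)] cols)), rows, cols)

-- canvas[cell_row][cell_col] |= _DOT_BIT[dot_row][dot_col], with try/except IndexError: pass
def pvSetPixel (canvas : List (List Int)) (px_x : Int) (px_y : Int) : List (List Int) :=
  let cell_col := PySem.Int.floordiv px_x 2
  let cell_row := PySem.Int.floordiv px_y 4
  let dot_col := PySem.Int.mod px_x 2
  let dot_row := PySem.Int.mod px_y 4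
  match PySem.List.pyGet? canvas cell_row with
  | none => canvas
  | some rowL =>
    match PySem.List.pyGet? rowL cell_col with
    | none => canvas
    | some v =>
      match PySem.List.pyGet? pvDotBit dot_row with
      | none => canvas
      | some bitRow =>
        match PySem.List.pyGet? bitRow dot_col with
        | none => canvas
        | some bit =>
          PySem.List.pySetD canvas cell_row (PySem.List.pySetD rowL cell_col (PySem.Int.bor v bit))

def pvCanvasToChars (canvas : List (List Int)) : List String :=
  canvas.map (fun row => String.ofList (row.map (fun cell => pvChr (0x2800 + cell))))

def render_segment_braille (width_cm : Int) (height_cm : Int) (label : String) : List String :=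
  let px_w := max 4 width_cm
  let px_h := max 8 height_cm
  let mc := pvMakeCanvas px_w px_h
  let rows := mc.2.1
  let cols := mc.2.2
  let canvas := (PySem.List.pyRange 0 px_w 1).foldl
    (fun cv px_x => pvSetPixel (pvSetPixel cv px_x 0) px_x (px_h - 1)) mc.1
  let canvas := (PySem.List.pyRange 0 px_h 1).foldl
    (fun cv px_y => pvSetPixel (pvSetPixel cv 0 px_y) (px_w - 1) px_y) canvas
  let lines := pvCanvasToChars canvas
  let lbl := PySem.Str.slice label none (some 2)
  if lbl ≠ "" ∧ 2 ≤ rows then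
    let mid_row := PySem.Int.floordiv rows 2
    let mid_col := max 0 (PySem.Int.floordiv (cols - PySem.Str.len lbl) 2)
    -- lines[mid_row] / lines[mid_row] = …: mid_row ∈ [0, rows) here, so pyGetD/pySetD are exact
    let row_list := (PySem.List.pyGetD lines mid_row "").toList
    let row_list := (PySem.List.enumerate lbl.toList 0).foldl
      (fun rl p => if mid_col + p.1 < PySem.List.len rl then PySem.List.pySetD rl (mid_col + p.1) p.2 else rl)
      row_list
    PySem.List.pySetD lines mid_row (String.ofList row_list)
  else lines

-- ===== PORT B =====
def pvDotBitB : List (List Int) := [[1, 8], [2, 16], [4, 32], [64, 128]]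

-- _DOT_BIT[dr][dc] with dr ∈ range(4), dc ∈ range(2): always in range, so pyGetD is exact
def pvCellValue (px_w : Int) (px_h : Int) (row : Int) (col : Int) : Int :=
  (PySem.List.pyRange 0 4 1).foldl (fun cell dr =>
    (PySem.List.pyRange 0 2 1).foldl (fun cell dc =>
      let x := col * 2 + dc
      let y := row * 4 + dr
      if x < px_w ∧ y < px_h ∧ (x = 0 ∨ x = px_w - 1 ∨ y = 0 ∨ y = px_h - 1) then
        PySem.Int.bor cell (PySem.List.pyGetD (PySem.List.pyGetD pvDotBitB dr []) dc 0)
      else cell) cell) 0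

def render_segment_braille_alt (width_cm : Int) (height_cm : Int) (label : String) : List String :=
  let px_w := max 4 width_cm
  let px_h := max 8 height_cm
  let cols := PySem.Int.floordiv (px_w + 1) 2
  let rows := PySem.Int.floordiv (px_h + 3) 4
  let lines := (PySem.List.pyRange 0 rows 1).map (fun row =>
    String.ofList ((PySem.List.pyRange 0 cols 1).map (fun col =>
      pvChr (0x2800 + pvCellValue px_w px_h row col))))
  let lbl := PySem.Str.slice label none (some 2)
  if lbl ≠ "" then
    let mid_row := PySem.Int.floordiv rows 2
    let mid_col := max 0 (PySem.Int.floordiv (cols - PySem.Str.len lbl) 2)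
    -- lines[mid_row] / lines[mid_row] = …: mid_row ∈ [0, rows) here, so pyGetD/pySetD are exact
    let row_list := (PySem.List.pyGetD lines mid_row "").toList
    let row_list := (PySem.List.enumerate lbl.toList 0).foldl
      (fun rl p => if mid_col + p.1 < PySem.List.len rl then PySem.List.pySetD rl (mid_col + p.1) p.2 else rl)
      row_list
    PySem.List.pySetD lines mid_row (String.ofList row_list)
  else lines

-- ===== PRECONDITION & SPEC =====
def Spec_render_segment_braille (width_cm : Int) (height_cm : Int) (label : String) (out : List String) : Prop := out = render_segment_braille_alt width_cm height_cm label
instance (width_cm : Int) (height_cm : Int) (label : String) (out : List String) : Decidable (Spec_render_segment_braille width_cm height_cm label out) := by unfold Spec_render_segment_braille; infer_instance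

-- ===== CLAIM (what is proved, stated in full; the proofs are below) =====
def Claim_equal_render_segment_braille : Prop := ∀ (width_cm : Int) (height_cm : Int) (label : String), Dom_render_segment_braille width_cm height_cm label → Spec_render_segment_braille width_cm height_cm label (render_segment_braille width_cm height_cm label)

-- ===== LEMMAS AND PROOFS =====

-- dot-bit table as a Nat function
def pvBit (i j : Nat) : Nat :=
  match i, j with
  | 0, 0 => 1 | 0, _ => 8
  | 1, 0 => 2 | 1, _ => 16
  | 2, 0 => 4 | 2, _ => 32
  | _, 0 => 64 | _, _ => 128

def pvGet (cv : List (List Int)) (r c : Nat) : Int := (cv.getD r []).getD c 0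

def pvRect (cv : List (List Int)) (R C : Nat) : Prop :=
  cv.length = R ∧ ∀ row ∈ cv, row.length = C

lemma pvDotBit_row (i : Nat) (hi : i < 4) :
    pvDotBit[i]? = some (pvDotBit.getD i []) := by
  interval_cases i <;> rfl

lemma pvDotBit_entry (i j : Nat) (hi : i < 4) (hj : j < 2) :
    (pvDotBit.getD i [])[j]? = some ((pvBit i j : Nat) : Int) := by
  interval_cases i <;> interval_cases j <;> rfl

lemma pvSetPixel_in (cv : List (List Int)) (a b : Nat) (h1 : b/4 < cv.length)
    (h2 : a/2 < (cv[b/4]'h1).length) :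
    pvSetPixel cv (a : Int) (b : Int)
      = cv.set (b/4) ((cv[b/4]'h1).set (a/2)
          (PySem.Int.bor ((cv[b/4]'h1)[a/2]'h2) ((pvBit (b%4) (a%2) : Nat) : Int))) := by
  have e1 : PySem.Int.floordiv (b:Int) 4 = ((b/4 : Nat) : Int) := by
    exact_mod_cast PySem.Int.floordiv_natCast b 4
  have e2 : PySem.Int.floordiv (a:Int) 2 = ((a/2 : Nat) : Int) := by
    exact_mod_cast PySem.Int.floordiv_natCast a 2
  have e3 : PySem.Int.mod (b:Int) 4 = ((b%4 : Nat) : Int) := by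
    exact_mod_cast PySem.Int.mod_natCast b 4
  have e4 : PySem.Int.mod (a:Int) 2 = ((a%2 : Nat) : Int) := by
    exact_mod_cast PySem.Int.mod_natCast a 2
  simp only [pvSetPixel, e1, e2, e3, e4,
    PySem.List.pyGet?_natCast, List.getElem?_eq_getElem h1, List.getElem?_eq_getElem h2,
    pvDotBit_row _ (Nat.mod_lt b (by omega)),
    pvDotBit_entry _ _ (Nat.mod_lt b (by omega)) (Nat.mod_lt a (by omega)),
    PySem.List.pySetD_natCast]

lemma pvSetPixel_oob₁ (cv : List (List Int)) (a b : Nat) (h1 : ¬ b/4 < cv.length) :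
    pvSetPixel cv (a : Int) (b : Int) = cv := by
  have e1 : PySem.Int.floordiv (b:Int) 4 = ((b/4 : Nat) : Int) := by
    exact_mod_cast PySem.Int.floordiv_natCast b 4
  have e2 : PySem.Int.floordiv (a:Int) 2 = ((a/2 : Nat) : Int) := by
    exact_mod_cast PySem.Int.floordiv_natCast a 2
  have e3 : PySem.Int.mod (b:Int) 4 = ((b%4 : Nat) : Int) := by
    exact_mod_cast PySem.Int.mod_natCast b 4
  have e4 : PySem.Int.mod (a:Int) 2 = ((a%2 : Nat) : Int) := by
    exact_mod_cast PySem.Int.mod_natCast a 2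
  simp only [pvSetPixel, e1, e2, e3, e4,
    PySem.List.pyGet?_natCast, List.getElem?_eq_none (by omega : cv.length ≤ b/4)]

lemma pvSetPixel_oob₂ (cv : List (List Int)) (a b : Nat) (h1 : b/4 < cv.length)
    (h2 : ¬ a/2 < (cv[b/4]'h1).length) :
    pvSetPixel cv (a : Int) (b : Int) = cv := by
  have e1 : PySem.Int.floordiv (b:Int) 4 = ((b/4 : Nat) : Int) := by
    exact_mod_cast PySem.Int.floordiv_natCast b 4
  have e2 : PySem.Int.floordiv (a:Int) 2 = ((a/2 : Nat) : Int) := by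
    exact_mod_cast PySem.Int.floordiv_natCast a 2
  have e3 : PySem.Int.mod (b:Int) 4 = ((b%4 : Nat) : Int) := by
    exact_mod_cast PySem.Int.mod_natCast b 4
  have e4 : PySem.Int.mod (a:Int) 2 = ((a%2 : Nat) : Int) := by
    exact_mod_cast PySem.Int.mod_natCast a 2
  simp only [pvSetPixel, e1, e2, e3, e4,
    PySem.List.pyGet?_natCast, List.getElem?_eq_getElem h1,
    List.getElem?_eq_none (by omega : (cv[b/4]'h1).length ≤ a/2)]

lemma pvGet_eq_row (cv : List (List Int)) (r c : Nat) (h1 : r < cv.length) :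
    pvGet cv r c = ((cv[r]'h1))[c]?.getD 0 := by
  unfold pvGet
  rw [show cv.getD r [] = cv[r]'h1 by
        rw [List.getD_eq_getElem?_getD, List.getElem?_eq_getElem h1, Option.getD_some],
      List.getD_eq_getElem?_getD]

lemma pvGet_set (cv : List (List Int)) (i : Nat) (w : List Int) (r c : Nat) :
    pvGet (cv.set i w) r c = if i = r ∧ i < cv.length then w[c]?.getD 0 else pvGet cv r c := by
  by_cases hir : i = r
  · subst hir
    by_cases hlen : i < cv.length
    · rw [if_pos ⟨rfl, hlen⟩, pvGet_eq_row (cv.set i w) i c (by simpa using hlen)]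
      rw [List.getElem_set_self]
    · rw [if_neg (by tauto), List.set_eq_of_length_le (by omega)]
  · rw [if_neg (by tauto)]
    unfold pvGet
    have hrow : (cv.set i w).getD r [] = cv.getD r [] := by
      rw [List.getD_eq_getElem?_getD, List.getD_eq_getElem?_getD, List.getElem?_set_ne hir]
    rw [hrow]

lemma pvSetPixel_get (cv : List (List Int)) (R C r c a b m : Nat)
    (hrect : pvRect cv R C) (hr : r < R) (hc : c < C) (hm : pvGet cv r c = (m : Int)) :
    pvRect (pvSetPixel cv (a : Int) (b : Int)) R C ∧
      pvGet (pvSetPixel cv (a : Int) (b : Int)) r c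
        = (((if b / 4 = r ∧ a / 2 = c then m ||| pvBit (b % 4) (a % 2) else m) : Nat) : Int) := by
  obtain ⟨hlen, hrows⟩ := hrect
  by_cases h1 : b/4 < cv.length
  · have hrowlen : (cv[b/4]'h1).length = C := hrows _ (List.getElem_mem h1)
    by_cases h2 : a/2 < C
    · have h2' : a/2 < (cv[b/4]'h1).length := by omega
      rw [pvSetPixel_in cv a b h1 h2']
      refine ⟨⟨by simpa using hlen, ?_⟩, ?_⟩
      · intro row hrow
        rcases List.mem_or_eq_of_mem_set hrow with h | h
        · exact hrows _ h
        · subst h; simp [hrowlen]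
      · rw [pvGet_set]
        by_cases hbr : b/4 = r
        · subst hbr
          rw [if_pos ⟨rfl, h1⟩]
          by_cases hac : a/2 = c
          · subst hac
            rw [List.getElem?_set_self h2']
            simp only [Option.getD_some]
            rw [if_pos (show True ∧ True from ⟨trivial, trivial⟩)]
            have hv : (cv[b/4]'h1)[a/2]'h2' = ((m : Nat) : Int) := by
              have h3 := pvGet_eq_row cv (b/4) (a/2) h1
              rw [List.getElem?_eq_getElem h2'] at h3
              simp only [Option.getD_some] at h3
              exact h3.symm.trans hm
            rw [hv, PySem.Int.bor_natCast]
          · rw [List.getElem?_set_ne hac, if_neg (by tauto), ← pvGet_eq_row cv (b/4) c h1]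
            exact hm
        · rw [if_neg (by tauto), if_neg (by tauto)]
          exact hm
    · rw [pvSetPixel_oob₂ cv a b h1 (by omega)]
      exact ⟨⟨hlen, hrows⟩, by rw [if_neg (by omega)]; exact hm⟩
  · rw [pvSetPixel_oob₁ cv a b h1]
    exact ⟨⟨hlen, hrows⟩, by rw [if_neg (by omega)]; exact hm⟩

lemma pvFold_get {R C r c : Nat} (l : List Nat) (body : List (List Int) → Nat → List (List Int))
    (step : Nat → Nat → Nat)
    (hbody : ∀ cv (m k : Nat), pvRect cv R C → pvGet cv r c = (m : Int) →
      pvRect (body cv k) R C ∧ pvGet (body cv k) r c = ((step m k : Nat) : Int)) :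
    ∀ cv (m : Nat), pvRect cv R C → pvGet cv r c = (m : Int) →
      pvRect (l.foldl body cv) R C ∧ pvGet (l.foldl body cv) r c = ((l.foldl step m : Nat) : Int) := by
  induction l with
  | nil => exact fun cv m h1 h2 => ⟨h1, by simpa using h2⟩
  | cons k t ih =>
    intro cv m h1 h2
    obtain ⟨h3, h4⟩ := hbody cv m k h1 h2
    simpa using ih (body cv k) (step m k) h3 h4

def pvGTB (H r j : Nat) : Nat :=
  (if 0 = r then pvBit 0 j else 0) ||| (if (H-1)/4 = r then pvBit ((H-1)%4) j else 0)

def pvGLR (W c j : Nat) : Nat :=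
  (if 0 = c then pvBit j 0 else 0) ||| (if (W-1)/2 = c then pvBit j ((W-1)%2) else 0)

def pvValA (W H r c : Nat) : Nat :=
  0 ||| (if 2*c < W then pvGTB H r 0 else 0) ||| (if 2*c+1 < W then pvGTB H r 1 else 0)
    ||| (if 4*r < H then pvGLR W c 0 else 0) ||| (if 4*r+1 < H then pvGLR W c 1 else 0)
    ||| (if 4*r+2 < H then pvGLR W c 2 else 0) ||| (if 4*r+3 < H then pvGLR W c 3 else 0)

lemma pvStepTB_eq (H r c m k : Nat) (h8 : 8 ≤ H) :
    (if (H-1)/4 = r ∧ k/2 = c then (if 0 = r ∧ k/2 = c then m ||| pvBit 0 (k%2) else m) ||| pvBit ((H-1)%4) (k%2)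
     else (if 0 = r ∧ k/2 = c then m ||| pvBit 0 (k%2) else m))
    = if k/2 = c then m ||| pvGTB H r (k%2) else m := by
  have h1 : (1:Nat) ≤ (H-1)/4 := by omega
  simp only [pvGTB]
  split_ifs <;> first | rfl | (exfalso; omega) | simp [Nat.or_zero, Nat.zero_or]

lemma pvStepLR_eq (W r c m k : Nat) (h4 : 4 ≤ W) :
    (if k/4 = r ∧ (W-1)/2 = c then (if k/4 = r ∧ 0 = c then m ||| pvBit (k%4) 0 else m) ||| pvBit (k%4) ((W-1)%2)
     else (if k/4 = r ∧ 0 = c then m ||| pvBit (k%4) 0 else m))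
    = if k/4 = r then m ||| pvGLR W c (k%4) else m := by
  have h1 : (1:Nat) ≤ (W-1)/2 := by omega
  simp only [pvGLR]
  split_ifs <;> first | rfl | (exfalso; omega) | simp [Nat.or_zero, Nat.zero_or]

lemma pvOrFold2 (g : Nat → Nat) (c m : Nat) (W : Nat) :
    (List.range W).foldl (fun acc k => if k/2 = c then acc ||| g (k%2) else acc) m
      = m ||| (if 2*c < W then g 0 else 0) ||| (if 2*c+1 < W then g 1 else 0) := by
  induction W with
  | zero => simp
  | succ n ih =>
    rw [List.range_succ, List.foldl_append, ih]
    simp only [List.foldl_cons, List.foldl_nil]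
    by_cases h : n/2 = c
    · rcases (by omega : n = 2*c ∨ n = 2*c+1) with h' | h' <;> subst h' <;>
        simp [(by omega : ¬(2*c < 2*c)), (by omega : 2*c < 2*c+1), (by omega : ¬(2*c+1 < 2*c)),
          (by omega : ¬(2*c+1 < 2*c+1)), (by omega : 2*c < 2*c+1+1), (by omega : 2*c+1 < 2*c+1+1),
          (by omega : (2*c)/2 = c), (by omega : (2*c)%2 = 0), (by omega : (2*c+1)/2 = c),
          (by omega : (2*c+1)%2 = 1), Nat.or_zero]
    · simp [h, (by omega : (2*c < n+1) ↔ (2*c < n)), (by omega : (2*c+1 < n+1) ↔ (2*c+1 < n))]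

lemma pvOrFold4 (g : Nat → Nat) (r m : Nat) (H : Nat) :
    (List.range H).foldl (fun acc k => if k/4 = r then acc ||| g (k%4) else acc) m
      = m ||| (if 4*r < H then g 0 else 0) ||| (if 4*r+1 < H then g 1 else 0)
          ||| (if 4*r+2 < H then g 2 else 0) ||| (if 4*r+3 < H then g 3 else 0) := by
  induction H with
  | zero => simp
  | succ n ih =>
    rw [List.range_succ, List.foldl_append, ih]
    simp only [List.foldl_cons, List.foldl_nil]
    by_cases h : n/4 = r
    · rcases (by omega : n = 4*r ∨ n = 4*r+1 ∨ n = 4*r+2 ∨ n = 4*r+3) with h' | h' | h' | h' <;>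
        subst h' <;>
        simp [(by omega : ¬(4*r < 4*r)), (by omega : ¬(4*r+1 < 4*r)), (by omega : ¬(4*r+2 < 4*r)),
          (by omega : ¬(4*r+3 < 4*r)), (by omega : ¬(4*r+1 < 4*r+1)), (by omega : ¬(4*r+2 < 4*r+1)),
          (by omega : ¬(4*r+3 < 4*r+1)), (by omega : ¬(4*r+2 < 4*r+2)), (by omega : ¬(4*r+3 < 4*r+2)),
          (by omega : ¬(4*r+3 < 4*r+3)), (by omega : 4*r < 4*r+1), (by omega : 4*r < 4*r+2),
          (by omega : 4*r+1 < 4*r+2), (by omega : 4*r < 4*r+3), (by omega : 4*r+1 < 4*r+3),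
          (by omega : 4*r+2 < 4*r+3), (by omega : 4*r < 4*r+4), (by omega : 4*r+1 < 4*r+4),
          (by omega : 4*r+2 < 4*r+4), (by omega : 4*r+3 < 4*r+4),
          (by omega : (4*r)/4 = r), (by omega : (4*r)%4 = 0), (by omega : (4*r+1)/4 = r),
          (by omega : (4*r+1)%4 = 1), (by omega : (4*r+2)/4 = r), (by omega : (4*r+2)%4 = 2),
          (by omega : (4*r+3)/4 = r), (by omega : (4*r+3)%4 = 3), Nat.or_zero]
    · simp [h, (by omega : (4*r < n+1) ↔ (4*r < n)), (by omega : (4*r+1 < n+1) ↔ (4*r+1 < n)),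
        (by omega : (4*r+2 < n+1) ↔ (4*r+2 < n)), (by omega : (4*r+3 < n+1) ↔ (4*r+3 < n))]

-- finite abstraction of the per-cell value: the four geometric cases as abstract propositions
def pvLHS (P1 P2 P3 P4 : Prop) [Decidable P1] [Decidable P2] [Decidable P3] [Decidable P4]
    (sh sw : Nat) : Nat :=
  0 ||| ((if P1 then pvBit 0 0 else 0) ||| (if P2 then pvBit sh 0 else 0))
    ||| (if ¬(P4 ∧ sw = 0) then (if P1 then pvBit 0 1 else 0) ||| (if P2 then pvBit sh 1 else 0) else 0)
    ||| (if ¬(P2 ∧ sh < 0) then (if P3 then pvBit 0 0 else 0) ||| (if P4 then pvBit 0 sw else 0) else 0)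
    ||| (if ¬(P2 ∧ sh < 1) then (if P3 then pvBit 1 0 else 0) ||| (if P4 then pvBit 1 sw else 0) else 0)
    ||| (if ¬(P2 ∧ sh < 2) then (if P3 then pvBit 2 0 else 0) ||| (if P4 then pvBit 2 sw else 0) else 0)
    ||| (if ¬(P2 ∧ sh < 3) then (if P3 then pvBit 3 0 else 0) ||| (if P4 then pvBit 3 sw else 0) else 0)

def pvStepR (P1 P2 P3 P4 : Prop) [Decidable P1] [Decidable P2] [Decidable P3] [Decidable P4]
    (sh sw : Nat) (v dr dc : Nat) : Nat :=
  if ¬(P4 ∧ sw < dc) ∧ ¬(P2 ∧ sh < dr) ∧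
      ((P3 ∧ dc = 0) ∨ (P4 ∧ dc = sw) ∨ (P1 ∧ dr = 0) ∨ (P2 ∧ dr = sh)) then
    v ||| pvBit dr dc
  else v

def pvRHS (P1 P2 P3 P4 : Prop) [Decidable P1] [Decidable P2] [Decidable P3] [Decidable P4]
    (sh sw : Nat) : Nat :=
  pvStepR P1 P2 P3 P4 sh sw (pvStepR P1 P2 P3 P4 sh sw (pvStepR P1 P2 P3 P4 sh sw
    (pvStepR P1 P2 P3 P4 sh sw (pvStepR P1 P2 P3 P4 sh sw (pvStepR P1 P2 P3 P4 sh sw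
      (pvStepR P1 P2 P3 P4 sh sw (pvStepR P1 P2 P3 P4 sh sw 0 0 0) 0 1) 1 0) 1 1) 2 0) 2 1) 3 0) 3 1

lemma pvAbs (P1 P2 P3 P4 : Prop) [Decidable P1] [Decidable P2] [Decidable P3] [Decidable P4]
    (sh sw : Nat) (hsh : sh < 4) (hsw : sw < 2) (h12 : ¬(P1 ∧ P2)) (h34 : ¬(P3 ∧ P4)) :
    pvLHS P1 P2 P3 P4 sh sw = pvRHS P1 P2 P3 P4 sh sw := by
  by_cases h1 : P1 <;> by_cases h2 : P2 <;> by_cases h3 : P3 <;> by_cases h4 : P4 <;>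
    first
      | exact (h12 ⟨h1, h2⟩).elim
      | exact (h34 ⟨h3, h4⟩).elim
      | (interval_cases sh <;> interval_cases sw <;>
          (try simp [pvLHS, pvRHS, pvStepR, h1, h2, h3, h4]) <;> decide)

lemma pvValA_eq (W H r c qh sh qw sw : Nat) (hH : H = 4*qh+sh+1) (hW : W = 2*qw+sw+1)
    (hsh : sh < 4) (hsw : sw < 2) (hqh : 1 ≤ qh) (hqw : 1 ≤ qw) (hr : r ≤ qh) (hc : c ≤ qw) :
    pvValA W H r c = pvLHS (r = 0) (r = qh) (c = 0) (c = qw) sh sw := by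
  subst hH; subst hW
  have e1 : (4*qh+sh+1-1)/4 = qh := by omega
  have e2 : (4*qh+sh+1-1)%4 = sh := by omega
  have e3 : (2*qw+sw+1-1)/2 = qw := by omega
  have e4 : (2*qw+sw+1-1)%2 = sw := by omega
  simp only [pvValA, pvGTB, pvGLR, pvLHS, e1, e2, e3, e4,
    (by omega : (0 = r) ↔ (r = 0)), (by omega : (qh = r) ↔ (r = qh)),
    (by omega : (0 = c) ↔ (c = 0)), (by omega : (qw = c) ↔ (c = qw)),
    (by omega : 2*c < 2*qw+sw+1),
    (by omega : (2*c+1 < 2*qw+sw+1) ↔ ¬((c = qw) ∧ sw = 0)),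
    (by omega : (4*r < 4*qh+sh+1) ↔ ¬((r = qh) ∧ sh < 0)),
    (by omega : (4*r+1 < 4*qh+sh+1) ↔ ¬((r = qh) ∧ sh < 1)),
    (by omega : (4*r+2 < 4*qh+sh+1) ↔ ¬((r = qh) ∧ sh < 2)),
    (by omega : (4*r+3 < 4*qh+sh+1) ↔ ¬((r = qh) ∧ sh < 3)), if_true]

lemma pvStepB_cast (W H r c qh sh qw sw : Nat) (hH : H = 4*qh+sh+1) (hW : W = 2*qw+sw+1)
    (hsh : sh < 4) (hsw : sw < 2) (hr : r ≤ qh) (hc : c ≤ qw)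
    (v : Int) (vn : Nat) (hv : v = (vn : Int)) (di dj : Int) (dr dc : Nat)
    (hdi : di = (dr : Int)) (hdj : dj = (dc : Int)) (hdr : dr < 4) (hdc : dc < 2) :
    (if ((c:Int) * 2 + dj < (W:Int) ∧ (r:Int) * 4 + di < (H:Int) ∧
          ((c:Int) * 2 + dj = 0 ∨ (c:Int) * 2 + dj = (W:Int) - 1 ∨
           (r:Int) * 4 + di = 0 ∨ (r:Int) * 4 + di = (H:Int) - 1)) then
        PySem.Int.bor v (PySem.List.pyGetD (PySem.List.pyGetD pvDotBitB di []) dj 0)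
      else v)
    = ((pvStepR (r = 0) (r = qh) (c = 0) (c = qw) sh sw vn dr dc : Nat) : Int) := by
  subst hv; subst hdi; subst hdj
  have hbit : PySem.List.pyGetD (PySem.List.pyGetD pvDotBitB (dr : Int) []) (dc : Int) 0
      = ((pvBit dr dc : Nat) : Int) := by
    interval_cases dr <;> interval_cases dc <;> decide
  have hiff : ((c:Int) * 2 + (dc:Int) < (W:Int) ∧ (r:Int) * 4 + (dr:Int) < (H:Int) ∧
          ((c:Int) * 2 + (dc:Int) = 0 ∨ (c:Int) * 2 + (dc:Int) = (W:Int) - 1 ∨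
           (r:Int) * 4 + (dr:Int) = 0 ∨ (r:Int) * 4 + (dr:Int) = (H:Int) - 1))
      ↔ (¬((c = qw) ∧ sw < dc) ∧ ¬((r = qh) ∧ sh < dr) ∧
          (((c = 0) ∧ dc = 0) ∨ ((c = qw) ∧ dc = sw) ∨ ((r = 0) ∧ dr = 0) ∨ ((r = qh) ∧ dr = sh))) := by
    omega
  simp only [pvStepR]
  by_cases hB : (¬((c = qw) ∧ sw < dc) ∧ ¬((r = qh) ∧ sh < dr) ∧
      (((c = 0) ∧ dc = 0) ∨ ((c = qw) ∧ dc = sw) ∨ ((r = 0) ∧ dr = 0) ∨ ((r = qh) ∧ dr = sh)))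
  · rw [if_pos (hiff.mpr hB), if_pos hB, hbit, PySem.Int.bor_natCast]
  · rw [if_neg (fun hh => hB (hiff.mp hh)), if_neg hB]

lemma pvCellValue_cast (W H r c qh sh qw sw : Nat) (hH : H = 4*qh+sh+1) (hW : W = 2*qw+sw+1)
    (hsh : sh < 4) (hsw : sw < 2) (hr : r ≤ qh) (hc : c ≤ qw) :
    pvCellValue (W:Int) (H:Int) (r:Int) (c:Int)
      = ((pvRHS (r = 0) (r = qh) (c = 0) (c = qw) sh sw : Nat) : Int) := by
  have h0 : PySem.List.pyRange 0 4 1 = [0,1,2,3] := by decide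
  have h1 : PySem.List.pyRange 0 2 1 = [0,1] := by decide
  simp only [pvCellValue, h0, h1, List.foldl_cons, List.foldl_nil]
  have s0 := pvStepB_cast W H r c qh sh qw sw hH hW hsh hsw hr hc (0 : Int) 0 (by simp) 0 0 0 0 (by norm_num) (by norm_num) (by norm_num) (by norm_num)
  have s1 := pvStepB_cast W H r c qh sh qw sw hH hW hsh hsw hr hc _ _ s0 0 1 0 1 (by norm_num) (by norm_num) (by norm_num) (by norm_num)
  have s2 := pvStepB_cast W H r c qh sh qw sw hH hW hsh hsw hr hc _ _ s1 1 0 1 0 (by norm_num) (by norm_num) (by norm_num) (by norm_num)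
  have s3 := pvStepB_cast W H r c qh sh qw sw hH hW hsh hsw hr hc _ _ s2 1 1 1 1 (by norm_num) (by norm_num) (by norm_num) (by norm_num)
  have s4 := pvStepB_cast W H r c qh sh qw sw hH hW hsh hsw hr hc _ _ s3 2 0 2 0 (by norm_num) (by norm_num) (by norm_num) (by norm_num)
  have s5 := pvStepB_cast W H r c qh sh qw sw hH hW hsh hsw hr hc _ _ s4 2 1 2 1 (by norm_num) (by norm_num) (by norm_num) (by norm_num)
  have s6 := pvStepB_cast W H r c qh sh qw sw hH hW hsh hsw hr hc _ _ s5 3 0 3 0 (by norm_num) (by norm_num) (by norm_num) (by norm_num)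
  have s7 := pvStepB_cast W H r c qh sh qw sw hH hW hsh hsw hr hc _ _ s6 3 1 3 1 (by norm_num) (by norm_num) (by norm_num) (by norm_num)
  exact s7.trans (by rfl)

-- per-cell main equality
lemma pvCell_main (W H r c : Nat) (h4 : 4 ≤ W) (h8 : 8 ≤ H)
    (hr : r < (H+3)/4) (hc : c < (W+1)/2) :
    pvCellValue (W:Int) (H:Int) (r:Int) (c:Int) = ((pvValA W H r c : Nat) : Int) := by
  obtain ⟨qh, sh, hsh, hH⟩ : ∃ qh sh, sh < 4 ∧ H = 4*qh+sh+1 :=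
    ⟨(H-1)/4, (H-1)%4, by omega, by omega⟩
  obtain ⟨qw, sw, hsw, hW⟩ : ∃ qw sw, sw < 2 ∧ W = 2*qw+sw+1 :=
    ⟨(W-1)/2, (W-1)%2, by omega, by omega⟩
  have hr' : r ≤ qh := by omega
  have hc' : c ≤ qw := by omega
  rw [pvCellValue_cast W H r c qh sh qw sw hH hW hsh hsw hr' hc',
      pvValA_eq W H r c qh sh qw sw hH hW hsh hsw (by omega) (by omega) hr' hc',
      pvAbs _ _ _ _ sh sw hsh hsw (by omega) (by omega)]

lemma pvRange_natCast (n : Nat) :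
    PySem.List.pyRange 0 (n:Int) 1 = (List.range n).map (fun k : Nat => (k : Int)) := by
  rw [PySem.List.pyRange_one]
  simp

lemma pvFloordiv2 (n : Nat) : PySem.Int.floordiv ((n:Nat) : Int) 2 = ((n/2 : Nat) : Int) := by
  exact_mod_cast PySem.Int.floordiv_natCast n 2

lemma pvFloordiv4 (n : Nat) : PySem.Int.floordiv ((n:Nat) : Int) 4 = ((n/4 : Nat) : Int) := by
  exact_mod_cast PySem.Int.floordiv_natCast n 4

lemma pvMakeCanvas_eq (W H : Nat) (h4 : 4 ≤ W) (h8 : 8 ≤ H) :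
    pvMakeCanvas (W:Int) (H:Int)
      = (List.replicate ((H+3)/4) (List.replicate ((W+1)/2) (0:Int)),
          (((H+3)/4 : Nat) : Int), (((W+1)/2 : Nat) : Int)) := by
  unfold pvMakeCanvas
  have e1 : (W:Int) + 2 - 1 = ((W+1 : Nat) : Int) := by push_cast; ring
  have e2 : (H:Int) + 4 - 1 = ((H+3 : Nat) : Int) := by push_cast; ring
  rw [e1, e2, pvFloordiv2 (W+1), pvFloordiv4 (H+3),
    max_eq_right (by omega : (1:Int) ≤ (((W+1)/2 : Nat) : Int)),
    max_eq_right (by omega : (1:Int) ≤ (((H+3)/4 : Nat) : Int))]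
  refine congrArg (fun l => (l, _, _)) ?_
  rw [PySem.List.pyRepeat_singleton, pvRange_natCast, List.map_map]
  have e3 : (((W:Int) + 1)/2).toNat = (W+1)/2 := by omega
  simp [Function.comp_def, e3, List.map_const']

lemma pvLines_eq (W H : Nat) (h4 : 4 ≤ W) (h8 : 8 ≤ H) :
    pvCanvasToChars
        ((PySem.List.pyRange 0 (H:Int) 1).foldl
          (fun cv px_y => pvSetPixel (pvSetPixel cv 0 px_y) ((W:Int) - 1) px_y)
          ((PySem.List.pyRange 0 (W:Int) 1).foldl
            (fun cv px_x => pvSetPixel (pvSetPixel cv px_x 0) px_x ((H:Int) - 1))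
            (List.replicate ((H+3)/4) (List.replicate ((W+1)/2) (0:Int)))))
      = (PySem.List.pyRange 0 (((H+3)/4 : Nat) : Int) 1).map (fun row =>
          String.ofList ((PySem.List.pyRange 0 (((W+1)/2 : Nat) : Int) 1).map (fun col =>
            pvChr (0x2800 + pvCellValue (W:Int) (H:Int) row col)))) := by
  have hH1 : (H:Int) - 1 = ((H-1 : Nat) : Int) := by omega
  have hW1 : (W:Int) - 1 = ((W-1 : Nat) : Int) := by omega
  have hz : (0:Int) = ((0:Nat) : Int) := rfl
  rw [pvRange_natCast W, pvRange_natCast H, List.foldl_map, List.foldl_map]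
  set R := (H+3)/4 with hR
  set C := (W+1)/2 with hC
  set cv0 : List (List Int) := List.replicate R (List.replicate C (0:Int)) with hcv0
  have h0rect : pvRect cv0 R C := by
    constructor
    · simp [hcv0]
    · intro row hrow
      rw [List.eq_of_mem_replicate hrow]
      simp
  have hmain : ∀ r c, r < R → c < C →
      pvRect ((List.range H).foldl
        (fun cv (k : Nat) => pvSetPixel (pvSetPixel cv 0 (k:Int)) ((W:Int) - 1) (k:Int))
        ((List.range W).foldl
          (fun cv (k : Nat) => pvSetPixel (pvSetPixel cv (k:Int) 0) (k:Int) ((H:Int) - 1)) cv0)) R C ∧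
      pvGet ((List.range H).foldl
        (fun cv (k : Nat) => pvSetPixel (pvSetPixel cv 0 (k:Int)) ((W:Int) - 1) (k:Int))
        ((List.range W).foldl
          (fun cv (k : Nat) => pvSetPixel (pvSetPixel cv (k:Int) 0) (k:Int) ((H:Int) - 1)) cv0)) r c
        = ((pvValA W H r c : Nat) : Int) := by
    intro r c hr hc
    have h0get : pvGet cv0 r c = ((0:Nat) : Int) := by
      rw [pvGet_eq_row cv0 r c (by simp [hcv0]; omega)]
      simp [hcv0, hc]
    obtain ⟨hrect1, hget1⟩ := pvFold_get (R := R) (C := C) (r := r) (c := c) (List.range W)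
      (fun cv (k : Nat) => pvSetPixel (pvSetPixel cv (k:Int) 0) (k:Int) ((H:Int) - 1))
      (fun m k => if k/2 = c then m ||| pvGTB H r (k%2) else m)
      (by
        intro cv m k hrect hget
        rw [hz, hH1]
        obtain ⟨ha, hb⟩ := pvSetPixel_get cv R C r c k 0 m hrect hr hc hget
        obtain ⟨ha2, hb2⟩ := pvSetPixel_get _ R C r c k (H-1) _ ha hr hc hb
        refine ⟨ha2, hb2.trans (congrArg _ ?_)⟩
        simp only [Nat.zero_div, Nat.zero_mod]
        exact pvStepTB_eq H r c m k h8)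
      cv0 0 h0rect h0get
    obtain ⟨hrect2, hget2⟩ := pvFold_get (R := R) (C := C) (r := r) (c := c) (List.range H)
      (fun cv (k : Nat) => pvSetPixel (pvSetPixel cv 0 (k:Int)) ((W:Int) - 1) (k:Int))
      (fun m k => if k/4 = r then m ||| pvGLR W c (k%4) else m)
      (by
        intro cv m k hrect hget
        rw [hz, hW1]
        obtain ⟨ha, hb⟩ := pvSetPixel_get cv R C r c 0 k m hrect hr hc hget
        obtain ⟨ha2, hb2⟩ := pvSetPixel_get _ R C r c (W-1) k _ ha hr hc hb
        refine ⟨ha2, hb2.trans (congrArg _ ?_)⟩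
        simp only [Nat.zero_div, Nat.zero_mod]
        exact pvStepLR_eq W r c m k h4)
      _ _ hrect1 hget1
    refine ⟨hrect2, hget2.trans (congrArg _ ?_)⟩
    rw [pvOrFold2, pvOrFold4]
    rfl
  have hR2 : 2 ≤ R := by omega
  have hC2 : 2 ≤ C := by omega
  obtain ⟨hrect, -⟩ := hmain 0 0 (by omega) (by omega)
  -- canvas as an explicit table
  have htable : (List.range H).foldl
        (fun cv (k : Nat) => pvSetPixel (pvSetPixel cv 0 (k:Int)) ((W:Int) - 1) (k:Int))
        ((List.range W).foldl
          (fun cv (k : Nat) => pvSetPixel (pvSetPixel cv (k:Int) 0) (k:Int) ((H:Int) - 1)) cv0)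
      = (List.range R).map (fun r => (List.range C).map (fun c => ((pvValA W H r c : Nat) : Int))) := by
    apply List.ext_getElem
    · simp [hrect.1]
    · intro i h1 h2
      have hiR : i < R := by
        have := hrect.1; omega
      rw [List.getElem_map, List.getElem_range]
      apply List.ext_getElem
      · have := hrect.2 _ (List.getElem_mem h1)
        simp [this]
      · intro j h3 h4
        have hjC : j < C := by
          have := hrect.2 _ (List.getElem_mem h1); omega
        rw [List.getElem_map, List.getElem_range]
        obtain ⟨-, hget⟩ := hmain i j hiR hjC
        rw [pvGet_eq_row _ i j (by omega), List.getElem?_eq_getElem (by omega), Option.getD_some] at hget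
        exact hget
    -- lengths for the getElem rewrites above are handled by omega side goals
  rw [htable, pvRange_natCast, pvRange_natCast]
  unfold pvCanvasToChars
  rw [List.map_map, List.map_map]
  apply List.map_congr_left
  intro r hrm
  simp only [Function.comp_apply, List.map_map]
  refine congrArg _ ?_
  apply List.map_congr_left
  intro cc hcm
  simp only [Function.comp_apply]
  rw [pvCell_main W H r cc h4 h8 (List.mem_range.mp hrm) (List.mem_range.mp hcm)]

-- ===== VERDICT (by name: the statement is the Claim_ definition above) =====
theorem render_segment_braille_spec : Claim_equal_render_segment_braille := by
  intro w h label _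
  unfold Spec_render_segment_braille
  have h4 : (4:Int) ≤ max 4 w := le_max_left _ _
  have h8 : (8:Int) ≤ max 8 h := le_max_left _ _
  have hw : max 4 w = (((max 4 w).toNat : Nat) : Int) := by omega
  have hh : max 8 h = (((max 8 h).toNat : Nat) : Int) := by omega
  set W := (max 4 w).toNat with hWdef
  set H := (max 8 h).toNat with hHdef
  have hW4 : 4 ≤ W := by omega
  have hH8 : 8 ≤ H := by omega
  simp only [render_segment_braille, render_segment_braille_alt]
  rw [hw, hh]
  rw [pvMakeCanvas_eq W H hW4 hH8]
  have eB1 : (W:Int) + 1 = ((W+1 : Nat) : Int) := by push_cast; ring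
  have eB2 : (H:Int) + 3 = ((H+3 : Nat) : Int) := by push_cast; ring
  rw [eB1, eB2, pvFloordiv2 (W+1), pvFloordiv4 (H+3)]
  simp only []
  rw [pvLines_eq W H hW4 hH8]
  have h2R : (2:Int) ≤ (((H+3)/4 : Nat) : Int) := by omega
  simp only [h2R, and_true]
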